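-- pv_equiv track=rewrite | github.com/Hector-Jv/TT_Backend | app/system_recomendations/apriori.py | generar_combinaciones
-- ===== SOURCE A (Python) =====
-- from itertools import combinations
--
-- def generar_combinaciones(lista):
--     resultados = []
--     n = len(lista)
--
--     for i in range(1, n):
--         comb = list(combinations(lista, i))
--         for c in comb:
--             temp = lista.copy()
--             for elemento in c:
--                 temp.remove(elemento)
--             resultados.append([c, tuple(temp)])
--
--     return resultados
-- ===== SOURCE B (Python) =====
-- from itertools import combinations
--
-- def generar_combinaciones(lista):
--     # One linear counted-scan builds each complement, instead of repeated list.remove.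
--     resultados = []
--     n = len(lista)
--     for i in range(1, n):
--         for c in combinations(lista, i):
--             cnt = {}
--             for e in c:
--                 cnt[e] = cnt.get(e, 0) + 1
--             temp = []
--             for x in lista:
--                 k = cnt.get(x, 0)
--                 if k != 0:
--                     cnt[x] = k - 1
--                 else:
--                     temp.append(x)
--             resultados.append([c, tuple(temp)])
--     return resultados
-- ===== Notes on version B (the rewrite author's own statement) =====
-- stated objective: alternative
-- what changed: Each complement is built by one counted left-to-right scan of the list with a count dictionary of the chosen combination, instead of copying the list and calling list.remove once per chosen element.
import Mathlib
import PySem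

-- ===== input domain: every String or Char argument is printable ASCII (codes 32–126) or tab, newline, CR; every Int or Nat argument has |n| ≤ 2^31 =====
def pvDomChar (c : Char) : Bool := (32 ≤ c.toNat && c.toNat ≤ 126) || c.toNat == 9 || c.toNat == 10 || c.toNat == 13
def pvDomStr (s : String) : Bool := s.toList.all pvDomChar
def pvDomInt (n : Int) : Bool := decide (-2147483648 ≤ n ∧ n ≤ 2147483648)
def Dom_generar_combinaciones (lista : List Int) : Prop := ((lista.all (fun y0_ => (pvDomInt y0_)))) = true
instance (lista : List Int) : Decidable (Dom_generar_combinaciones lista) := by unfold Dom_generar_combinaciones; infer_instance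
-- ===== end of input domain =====

-- B builds each complement by one counted scan of the list (dict of chosen multiplicities)
-- instead of A's list.copy + repeated list.remove; same values, alternative algorithm.

-- ===== PORT A =====
-- itertools.combinations(xs, k) over a list, in itertools order (lex by index); shared by both ports.
def pyCombinations (k : Nat) (xs : List Int) : List (List Int) :=
  match xs, k with
  | _, 0 => [[]]
  | [], _ + 1 => []
  | x :: rest, j + 1 =>
      (pyCombinations j rest).map (fun c => x :: c) ++ pyCombinations (j + 1) rest

def generar_combinaciones (lista : List Int) : List (List (List Int)) :=
  let n : Int := lista.length
  (PySem.List.pyRange 1 n 1).foldl (fun resultados i =>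
    let comb := pyCombinations i.toNat lista
    comb.foldl (fun resultados c =>
      let temp := c.foldl (fun temp elemento =>
        (PySem.List.remove? temp elemento).getD temp) lista   -- temp.remove(e); e is always present, so no ValueError
      resultados ++ [[c, temp]]) resultados) []

-- ===== PORT B =====
def generar_combinaciones_alt (lista : List Int) : List (List (List Int)) :=
  let n : Int := lista.length
  (PySem.List.pyRange 1 n 1).foldl (fun resultados i =>
    (pyCombinations i.toNat lista).foldl (fun resultados c =>
      let cnt : PySem.Dict Int Int := c.foldl (fun d e => d.insert e (d.getD e 0 + 1)) PySem.Dict.empty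
      let temp := (lista.foldl (fun (st : List Int × PySem.Dict Int Int) x =>
        let k := st.2.getD x 0
        if k ≠ 0 then (st.1, st.2.insert x (k - 1)) else (st.1 ++ [x], st.2)) ([], cnt)).1
      resultados ++ [[c, temp]]) resultados) []

-- ===== PRECONDITION & SPEC =====
def Spec_generar_combinaciones (lista : List Int) (out : List (List (List Int))) : Prop := out = generar_combinaciones_alt lista
instance (lista : List Int) (out : List (List (List Int))) : Decidable (Spec_generar_combinaciones lista out) := by unfold Spec_generar_combinaciones; infer_instance

-- ===== CLAIM (what is proved, stated in full; the proofs are below) =====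
def Claim_equal_generar_combinaciones : Prop := ∀ (lista : List Int), Dom_generar_combinaciones lista → Spec_generar_combinaciones lista (generar_combinaciones lista)

-- ===== LEMMAS AND PROOFS =====

-- reference: scan keeping elements whose remaining count is zero, counts as a function
def pvScanF : List Int → (Int → Nat) → List Int
  | [], _ => []
  | x :: xs, f =>
      if f x ≠ 0 then pvScanF xs (fun y => if y = x then f x - 1 else f y)
      else x :: pvScanF xs f

-- "remove first occurrence, or keep the list if absent" (A's inner step)
def pvRem1 (l : List Int) (e : Int) : List Int := (PySem.List.remove? l e).getD l

theorem pvScanF_zero (l : List Int) : pvScanF l (fun _ => 0) = l := by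
  induction l with
  | nil => rfl
  | cons x xs ih => simp [pvScanF, ih]

theorem pvRem1_nil (e : Int) : pvRem1 [] e = [] := by
  simp [pvRem1, PySem.List.remove?]

theorem pvRem1_cons_self (e : Int) (xs : List Int) : pvRem1 (e :: xs) e = xs := by
  simp [pvRem1, PySem.List.remove?_cons_self]

theorem pvRem1_cons_ne (x e : Int) (h : x ≠ e) (xs : List Int) :
    pvRem1 (x :: xs) e = x :: pvRem1 xs e := by
  simp only [pvRem1, PySem.List.remove?_cons_of_ne xs h]
  cases PySem.List.remove? xs e <;> simp

-- core: scanning with one extra copy of e counted equals scanning the list with e's first occurrence removed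
theorem pvScanF_succ (l : List Int) : ∀ (f : Int → Nat) (e : Int),
    pvScanF l (fun x => f x + if x = e then 1 else 0) = pvScanF (pvRem1 l e) f := by
  induction l with
  | nil => intro f e; simp [pvRem1_nil, pvScanF]
  | cons x xs ih =>
    intro f e
    by_cases hxe : x = e
    · subst hxe
      rw [pvRem1_cons_self]
      have h1 : (fun y => f y + if y = x then 1 else 0) x ≠ 0 := by simp
      rw [pvScanF, if_pos h1]
      have hfun : (fun y => if y = x then (fun z => f z + if z = x then 1 else 0) x - 1 else f y + if y = x then 1 else 0) = f := by
        funext y; by_cases hy : y = x <;> simp [hy]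
      rw [hfun]
    · rw [pvRem1_cons_ne x e hxe]
      by_cases hfx : f x = 0
      · rw [pvScanF, pvScanF]
        simp only [hxe, if_false, Nat.add_zero, hfx]
        simp only [ne_eq, not_true, if_false]
        rw [ih f e]
      · rw [pvScanF, pvScanF]
        have h1 : f x + (if x = e then 1 else 0) ≠ 0 := by simp [hxe, hfx]
        rw [if_pos h1, if_pos hfx]
        have hfun : (fun y => if y = x then f x + (if x = e then 1 else 0) - 1 else f y + if y = e then 1 else 0)
            = (fun y => (fun z => if z = x then f x - 1 else f z) y + if y = e then 1 else 0) := by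
          funext y
          by_cases hy : y = x
          · subst hy; simp [hxe]
          · simp [hy]
        rw [hfun, ih]

-- A's inner loop computes the counted scan of lista with the multiplicities of c
theorem pvRemoveFold_eq_scanF (c : List Int) : ∀ (l : List Int),
    c.foldl (fun temp elemento => (PySem.List.remove? temp elemento).getD temp) l
      = pvScanF l (fun x => c.count x) := by
  induction c with
  | nil => intro l; simpa using (pvScanF_zero l).symm
  | cons e cs ih =>
    intro l
    have h1 : (e :: cs).foldl (fun temp elemento => (PySem.List.remove? temp elemento).getD temp) l
        = cs.foldl (fun temp elemento => (PySem.List.remove? temp elemento).getD temp) (pvRem1 l e) := by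
      simp [List.foldl, pvRem1]
    rw [h1, ih (pvRem1 l e), ← pvScanF_succ l (fun x => cs.count x) e]
    congr 1
    funext x
    by_cases hx : x = e <;> simp [hx, Ne.symm]

-- B's scan with a dict whose getD agrees with g computes pvScanF
theorem pvAltScan_eq_scanF (l : List Int) : ∀ (acc : List Int) (d : PySem.Dict Int Int) (g : Int → Nat),
    (∀ x, d.getD x 0 = (g x : Int)) →
    (l.foldl (fun (st : List Int × PySem.Dict Int Int) x =>
        let k := st.2.getD x 0
        if k ≠ 0 then (st.1, st.2.insert x (k - 1)) else (st.1 ++ [x], st.2)) (acc, d)).1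
      = acc ++ pvScanF l g := by
  induction l with
  | nil => intro acc d g _; simp [pvScanF]
  | cons x xs ih =>
    intro acc d g hinv
    by_cases hg : g x = 0
    · have hk : d.getD x 0 = 0 := by rw [hinv x, hg]; rfl
      simp only [List.foldl, hk]
      rw [if_neg (by simp)]
      rw [ih (acc ++ [x]) d g hinv]
      simp [pvScanF, hg]
    · have hk : d.getD x 0 ≠ 0 := by rw [hinv x]; exact_mod_cast hg
      simp only [List.foldl]
      rw [if_pos (by simpa using hk)]
      rw [ih acc (d.insert x (d.getD x 0 - 1)) (fun y => if y = x then g x - 1 else g y)]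
      · simp only [pvScanF, if_pos hg]
      · intro y
        rw [PySem.Dict.getD_insert]
        by_cases hy : y = x
        · simp only [hy, hinv x]
          have : 1 ≤ g x := Nat.one_le_iff_ne_zero.mpr hg
          push_cast [this]
          ring
        · simp [hy, hinv y]

-- pointwise-equal step functions give equal foldl results
theorem pv_foldl_ext {α β : Type} (l : List α) (f g : β → α → β) (h : ∀ b a, f b a = g b a) :
    ∀ b, l.foldl f b = l.foldl g b := by
  induction l with
  | nil => intro b; rfl
  | cons x xs ih => intro b; simp only [List.foldl]; rw [h b x]; exact ih (g b x)

-- the per-combination complements agree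
theorem pv_temp_eq (c l : List Int) :
    c.foldl (fun temp elemento => (PySem.List.remove? temp elemento).getD temp) l
      = (l.foldl (fun (st : List Int × PySem.Dict Int Int) x =>
          let k := st.2.getD x 0
          if k ≠ 0 then (st.1, st.2.insert x (k - 1)) else (st.1 ++ [x], st.2))
          ([], c.foldl (fun d e => d.insert e (d.getD e 0 + 1)) PySem.Dict.empty)).1 := by
  have hcnt : c.foldl (fun d e => d.insert e (d.getD e 0 + 1)) PySem.Dict.empty = PySem.Dict.counter c :=
    PySem.Dict.foldl_insert_getD_add_one_eq_counter c
  rw [hcnt]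
  rw [pvAltScan_eq_scanF l [] (PySem.Dict.counter c) (fun x => c.count x)
      (fun x => PySem.Dict.getD_counter c x)]
  rw [pvRemoveFold_eq_scanF c l]
  simp

-- ===== VERDICT (by name: the statement is the Claim_ definition above) =====
theorem generar_combinaciones_spec : Claim_equal_generar_combinaciones := by
  intro lista _
  unfold Spec_generar_combinaciones generar_combinaciones generar_combinaciones_alt
  apply pv_foldl_ext
  intro res i
  apply pv_foldl_ext
  intro res' c
  rw [pv_temp_eq c lista]
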